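-- pv_equiv track=rewrite | github.com/LEE-CHENYU/Instagram-Network_scraping_and_analysis | essentialRoutines_fixed.py | adjList_to_dict
-- ===== SOURCE A (Python) =====
-- def adjList_to_dict(adjList):
--     """
--     Convert adjacency list to dictionary
--     Input: list of strings in format "follower followed"
--     Output: dict with follower as key and list of followed as value
--     """
--     allNodes = {}
--     for line in adjList:
--         list_of_persons = line.strip('\n').split(" ")
--         if len(list_of_persons) >= 2:  # Ensure there's at least follower and followed
--             person = list_of_persons[0]
--             followed = list_of_persons[1]
--
--             if person not in allNodes:
--                 allNodes[person] = []
--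
--             if followed not in allNodes[person]:
--                 allNodes[person].append(followed)
--
--     return allNodes
-- ===== SOURCE B (Python) =====
-- def adjList_to_dict(adjList):
--     """Two-pass variant: accumulate every followed value (duplicates included),
--     then collapse each value list order-preservingly with dict.fromkeys."""
--     raw = {}
--     for line in adjList:
--         parts = line.strip('\n').split(" ")
--         if len(parts) >= 2:
--             raw.setdefault(parts[0], []).append(parts[1])
--     return {k: list(dict.fromkeys(v)) for k, v in raw.items()}
-- ===== Notes on version B (the rewrite author's own statement) =====
-- stated objective: simpler
-- what changed: Replaces the single-pass per-line membership check-and-append with a two-pass decomposition: first accumulate all followed values per follower (duplicates included) via setdefault/append, then dedup each value list order-preservingly with dict.fromkeys in a final comprehension.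
import Mathlib
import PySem

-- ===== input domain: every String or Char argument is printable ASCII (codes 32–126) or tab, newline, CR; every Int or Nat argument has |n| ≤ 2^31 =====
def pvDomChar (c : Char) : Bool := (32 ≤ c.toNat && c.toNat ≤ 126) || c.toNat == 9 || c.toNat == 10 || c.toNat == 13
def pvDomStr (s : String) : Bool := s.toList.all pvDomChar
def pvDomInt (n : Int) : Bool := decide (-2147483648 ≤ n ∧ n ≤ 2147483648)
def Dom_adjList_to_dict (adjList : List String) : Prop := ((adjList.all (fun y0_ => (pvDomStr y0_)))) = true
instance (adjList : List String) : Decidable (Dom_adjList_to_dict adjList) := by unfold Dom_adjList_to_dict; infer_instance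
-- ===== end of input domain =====

-- B replaces A's single-pass membership check-and-append with a two-pass decomposition
-- (accumulate all followed values, then dedup each list with dict.fromkeys); objective: simpler.


-- ===== PORT A =====
-- line.strip('\n').split(" ") ; split(" ") never raises (sep ≠ ""), so .getD [] is exact
def adjList_to_dict (adjList : List String) : List (String × List String) :=
  (adjList.foldl (fun allNodes line =>
      let list_of_persons := (PySem.Str.split? (PySem.Str.stripChars line "\n") " ").getD []
      if 2 ≤ list_of_persons.length then
        let person := PySem.List.pyGetD list_of_persons 0 ""
        let followed := PySem.List.pyGetD list_of_persons 1 ""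
        let d1 := if allNodes.contains person then allNodes else allNodes.insert person []
        if followed ∈ d1.getD person [] then d1
        else d1.insert person (d1.getD person [] ++ [followed])
      else allNodes)
    (PySem.Dict.empty : PySem.Dict String (List String))).items

-- ===== PORT B =====
def adjList_to_dict_alt (adjList : List String) : List (String × List String) :=
  let raw := adjList.foldl (fun raw line =>
      let parts := (PySem.Str.split? (PySem.Str.stripChars line "\n") " ").getD []
      if 2 ≤ parts.length then
        let k := PySem.List.pyGetD parts 0 ""
        raw.insert k (raw.getD k [] ++ [PySem.List.pyGetD parts 1 ""])
      else raw)
    (PySem.Dict.empty : PySem.Dict String (List String))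
  raw.items.map (fun kv => (kv.1, PySem.List.dedup kv.2))

-- ===== PRECONDITION & SPEC =====
def Spec_adjList_to_dict (adjList : List String) (out : List (String × List String)) : Prop := out = adjList_to_dict_alt adjList
instance (adjList : List String) (out : List (String × List String)) : Decidable (Spec_adjList_to_dict adjList out) := by unfold Spec_adjList_to_dict; infer_instance

-- ===== CLAIM (what is proved, stated in full; the proofs are below) =====
def Claim_equal_adjList_to_dict : Prop := ∀ (adjList : List String), Dom_adjList_to_dict adjList → Spec_adjList_to_dict adjList (adjList_to_dict adjList)

-- ===== LEMMAS AND PROOFS =====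

-- the dict A maintains is B's raw dict with every value list deduplicated
def pvMapVals (d : PySem.Dict String (List String)) : PySem.Dict String (List String) :=
  PySem.Dict.mk (d.items.map (fun kv => (kv.1, PySem.List.dedup kv.2)))

theorem pvMapVals_contains (d : PySem.Dict String (List String)) (p : String) :
    (pvMapVals d).contains p = d.contains p := by
  cases d with
  | mk items =>
    simp [pvMapVals, PySem.Dict.contains_mk, List.any_map, Function.comp_def]

theorem pvMapVals_get? (d : PySem.Dict String (List String)) (p : String) :
    (pvMapVals d).get? p = (d.get? p).map PySem.List.dedup := by
  cases d with
  | mk items =>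
    induction items with
    | nil => simp [pvMapVals, PySem.Dict.get?]
    | cons kv rest ih =>
      obtain ⟨k, v⟩ := kv
      simp only [pvMapVals, List.map_cons, PySem.Dict.get?_mk_cons]
      split
      · simp
      · simpa [pvMapVals] using ih

theorem pvMapVals_insert (d : PySem.Dict String (List String)) (p : String) (v : List String) :
    pvMapVals (d.insert p v) = (pvMapVals d).insert p (PySem.List.dedup v) := by
  apply PySem.Dict.ext
  by_cases hc : d.contains p = true
  · rw [show (pvMapVals (d.insert p v)).items = (d.insert p v).items.map (fun kv => (kv.1, PySem.List.dedup kv.2)) from rfl,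
      PySem.Dict.items_insert_of_contains d v hc,
      PySem.Dict.items_insert_of_contains (pvMapVals d) (PySem.List.dedup v) (by rw [pvMapVals_contains]; exact hc)]
    simp only [pvMapVals, List.map_map]
    apply List.map_congr_left
    intro q _
    by_cases h : q.1 = p <;> simp [h]
  · rw [show (pvMapVals (d.insert p v)).items = (d.insert p v).items.map (fun kv => (kv.1, PySem.List.dedup kv.2)) from rfl,
      PySem.Dict.items_insert_of_not_contains d v (by simpa using hc),
      PySem.Dict.items_insert_of_not_contains (pvMapVals d) (PySem.List.dedup v) (by rw [pvMapVals_contains]; simpa using hc)]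
    simp [pvMapVals]

theorem pvMapVals_keys (d : PySem.Dict String (List String)) :
    (pvMapVals d).keys = d.keys := by
  cases d with
  | mk items => simp [pvMapVals, PySem.Dict.keys]

-- the map that insert performs on items is the identity when the value is unchanged
theorem pvMapSelf (items : List (String × List String)) (p : String) (v : List String)
    (hnd : (items.map Prod.fst).Nodup) (h : (PySem.Dict.mk items).get? p = some v) :
    items.map (fun q => if (q.1 == p) = true then (p, v) else q) = items := by
  induction items with
  | nil => rfl
  | cons kv rest ih =>
    obtain ⟨k, w⟩ := kv
    simp only [PySem.Dict.get?_mk_cons] at h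
    simp only [List.map_cons, List.nodup_cons] at hnd
    by_cases hk : (k == p) = true
    · have hkp : k = p := by simpa using hk
      have hv : w = v := by rw [if_pos hk] at h; injection h
      subst hkp
      subst hv
      simp only [List.map_cons, if_pos hk, List.cons.injEq, true_and]
      have hnot : ∀ q ∈ rest, (q.1 == k) = false := by
        intro q hq
        by_contra hb
        have hqk : q.1 = k := by simpa using hb
        exact hnd.1 (hqk ▸ List.mem_map_of_mem hq)
      calc rest.map (fun q => if (q.1 == k) = true then (k, w) else q)
          = rest.map id := List.map_congr_left (fun q hq => by simp [hnot q hq])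
        _ = rest := List.map_id rest
    · rw [if_neg (by simpa using hk)] at h
      simp only [List.map_cons, if_neg (by simpa using hk : ¬ (k == p) = true)]
      rw [ih hnd.2 h]

-- inserting back the value a key already holds changes nothing (needs nodup keys)
theorem pvInsert_self (d : PySem.Dict String (List String)) (p : String) (v : List String)
    (hnd : d.keys.Nodup) (h : d.get? p = some v) : d.insert p v = d := by
  apply PySem.Dict.ext
  have hc : d.contains p = true := by
    rw [PySem.Dict.contains_eq_isSome_get?, h]; rfl
  rw [PySem.Dict.items_insert_of_contains d v hc]
  exact pvMapSelf d.items p v hnd h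

theorem pvDedup_snoc (v : List String) (x : String) :
    PySem.List.dedup (v ++ [x]) =
      if x ∈ v then PySem.List.dedup v else PySem.List.dedup v ++ [x] := by
  have h1 : PySem.List.dedup (v ++ [x]) = PySem.Set.add (PySem.List.dedup v) x := by
    simp only [PySem.List.dedup_eq_ofList, PySem.Set.ofList, List.foldl_append,
      List.foldl_cons, List.foldl_nil]
  rw [h1, PySem.Set.add]
  by_cases hm : x ∈ v
  · rw [if_pos (by simp [hm]), if_pos hm]
  · rw [if_neg (by simp [hm]), if_neg hm]

-- one line's update on A's side equals dedup-mapping one raw append on B's side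
theorem pvStep (d : PySem.Dict String (List String)) (p f : String) (hnd : d.keys.Nodup) :
    (let d1 := if (pvMapVals d).contains p then pvMapVals d else (pvMapVals d).insert p []
     if f ∈ d1.getD p [] then d1 else d1.insert p (d1.getD p [] ++ [f]))
    = pvMapVals (d.insert p (d.getD p [] ++ [f])) := by
  by_cases hc : d.contains p = true
  · obtain ⟨v, hv⟩ : ∃ v, d.get? p = some v := by
      rw [PySem.Dict.contains_eq_isSome_get?] at hc
      exact Option.isSome_iff_exists.mp hc
    have hgd : d.getD p [] = v := PySem.Dict.getD_of_get?_eq_some d [] hv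
    have hgm : (pvMapVals d).get? p = some (PySem.List.dedup v) := by
      rw [pvMapVals_get?, hv]; rfl
    have hgdm : (pvMapVals d).getD p [] = PySem.List.dedup v :=
      PySem.Dict.getD_of_get?_eq_some (pvMapVals d) [] hgm
    simp only [pvMapVals_contains, hc, if_pos, hgdm, hgd, pvMapVals_insert, pvDedup_snoc]
    by_cases hm : f ∈ v
    · rw [if_pos ((PySem.List.mem_dedup v f).mpr hm), if_pos hm,
        pvInsert_self _ _ _ (by rw [pvMapVals_keys]; exact hnd) hgm]
    · rw [if_neg (fun h => hm ((PySem.List.mem_dedup v f).mp h)), if_neg hm]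
  · have hg : d.get? p = none := by
      rw [PySem.Dict.get?_eq_none_iff_contains]; simpa using hc
    have hgd : d.getD p [] = [] := PySem.Dict.getD_of_get?_eq_none d [] hg
    simp only [pvMapVals_contains, hc, if_neg, Bool.false_eq_true, not_false_iff, hgd,
      List.nil_append, pvMapVals_insert]
    rw [PySem.Dict.getD_insert_self]
    simp only [List.not_mem_nil, if_neg, not_false_iff, List.nil_append,
      PySem.Dict.insert_insert_self]
    rfl

theorem pvFold (lines : List String) (d : PySem.Dict String (List String)) (hnd : d.keys.Nodup) :
    lines.foldl (fun allNodes line =>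
      let list_of_persons := (PySem.Str.split? (PySem.Str.stripChars line "\n") " ").getD []
      if 2 ≤ list_of_persons.length then
        let person := PySem.List.pyGetD list_of_persons 0 ""
        let followed := PySem.List.pyGetD list_of_persons 1 ""
        let d1 := if allNodes.contains person then allNodes else allNodes.insert person []
        if followed ∈ d1.getD person [] then d1
        else d1.insert person (d1.getD person [] ++ [followed])
      else allNodes) (pvMapVals d)
    = pvMapVals (lines.foldl (fun raw line =>
      let parts := (PySem.Str.split? (PySem.Str.stripChars line "\n") " ").getD []
      if 2 ≤ parts.length then
        let k := PySem.List.pyGetD parts 0 ""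
        raw.insert k (raw.getD k [] ++ [PySem.List.pyGetD parts 1 ""])
      else raw) d) := by
  induction lines generalizing d with
  | nil => rfl
  | cons line rest ih =>
    simp only [List.foldl_cons]
    by_cases h : 2 ≤ ((PySem.Str.split? (PySem.Str.stripChars line "\n") " ").getD []).length
    · rw [if_pos h, if_pos h]
      rw [pvStep _ _ _ hnd]
      exact ih _ (PySem.Dict.nodup_keys_insert _ _ _ hnd)
    · rw [if_neg h, if_neg h]
      exact ih _ hnd

-- ===== VERDICT (by name: the statement is the Claim_ definition above) =====
theorem adjList_to_dict_spec : Claim_equal_adjList_to_dict := by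
  intro adjList _
  unfold Spec_adjList_to_dict adjList_to_dict adjList_to_dict_alt
  have h := pvFold adjList PySem.Dict.empty PySem.Dict.nodup_keys_empty
  have he : pvMapVals (PySem.Dict.empty : PySem.Dict String (List String)) = PySem.Dict.empty := rfl
  rw [he] at h
  rw [h]
  rfl
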